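-- pv_equiv track=rewrite | github.com/fiona-cai/Fiona-TheDiscordBot | sudoku.py | list_unique
-- ===== SOURCE A (Python) =====
-- def list_unique(l):
--     nums = []
--     for num in l:
--         if num != 0:
--             if num in nums:
--                 return False
--             else:
--                 nums.append(num)
--     return True
-- ===== SOURCE B (Python) =====
-- def list_unique(l):
--     nums = [x for x in l if x != 0]
--     return len(nums) == len(set(nums))
-- ===== Notes on version B (the rewrite author's own statement) =====
-- stated objective: simpler
-- what changed: Replaces the incremental membership-scan loop with early exit by a one-pass filter of nonzero elements followed by a set-cardinality comparison (len(nums) == len(set(nums))).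
import Mathlib
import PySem

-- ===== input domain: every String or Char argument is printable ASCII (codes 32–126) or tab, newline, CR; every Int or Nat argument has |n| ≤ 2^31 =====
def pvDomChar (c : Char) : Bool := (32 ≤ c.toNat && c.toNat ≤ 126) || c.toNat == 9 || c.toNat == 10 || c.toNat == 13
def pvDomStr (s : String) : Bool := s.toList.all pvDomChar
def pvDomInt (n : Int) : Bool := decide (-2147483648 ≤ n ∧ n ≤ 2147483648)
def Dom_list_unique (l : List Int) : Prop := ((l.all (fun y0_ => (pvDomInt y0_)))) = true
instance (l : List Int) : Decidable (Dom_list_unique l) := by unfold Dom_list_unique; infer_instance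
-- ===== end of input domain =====

-- B: one-pass filter of nonzeros then set-cardinality comparison, instead of A's incremental membership scan with early exit.
-- ===== PORT A =====
def listUniqueGo : List Int → List Int → Bool
  | [], _ => true
  | num :: t, nums =>
    if num ≠ 0 then
      if num ∈ nums then false
      else listUniqueGo t (nums ++ [num])
    else listUniqueGo t nums

def list_unique (l : List Int) : Bool := listUniqueGo l []

-- ===== PORT B =====
def list_unique_alt (l : List Int) : Bool :=
  let nums := l.filter (fun x => x != 0)
  nums.length == (PySem.Set.ofList nums).length

-- ===== PRECONDITION & SPEC =====
def Spec_list_unique (l : List Int) (out : Bool) : Prop := out = list_unique_alt l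
instance (l : List Int) (out : Bool) : Decidable (Spec_list_unique l out) := by unfold Spec_list_unique; infer_instance

-- ===== CLAIM (what is proved, stated in full; the proofs are below) =====
def Claim_equal_list_unique : Prop := ∀ (l : List Int), Dom_list_unique l → Spec_list_unique l (list_unique l)

-- ===== LEMMAS AND PROOFS =====

lemma lenFoldlAdd_le : ∀ (xs s : List Int), (xs.foldl PySem.Set.add s).length ≤ s.length + xs.length := by
  intro xs
  induction xs with
  | nil => intro s; simp
  | cons x xs ih =>
    intro s
    simp only [List.foldl_cons]
    refine le_trans (ih _) ?_
    simp only [PySem.Set.add]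
    split_ifs <;> simp <;> omega

lemma lenFoldlAdd (xs : List Int) : ∀ (s : List Int), s.Nodup →
    ((xs.foldl PySem.Set.add s).length == s.length + xs.length) = decide ((s ++ xs).Nodup) := by
  induction xs with
  | nil => intro s hs; simp [hs]
  | cons x xs ih =>
    intro s hs
    simp only [List.foldl_cons]
    by_cases hx : x ∈ s
    · have hadd : PySem.Set.add s x = s := by
        simp [PySem.Set.add, PySem.Set.contains, hx]
      rw [hadd]
      have hle := lenFoldlAdd_le xs s
      have h1 : ((xs.foldl PySem.Set.add s).length == s.length + (x :: xs).length) = false := by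
        simp only [List.length_cons, beq_eq_false_iff_ne, ne_eq]
        omega
      rw [h1]
      have h2 : ¬ (s ++ x :: xs).Nodup := by
        intro h
        exact (List.disjoint_of_nodup_append h) hx (by simp)
      simp [h2]
    · have hadd : PySem.Set.add s x = s ++ [x] := by
        simp [PySem.Set.add, PySem.Set.contains, hx]
      rw [hadd]
      have hs' : (s ++ [x]).Nodup :=
        List.Nodup.append hs (List.nodup_singleton x) (List.disjoint_singleton.mpr hx)
      have hlen : s.length + (x :: xs).length = (s ++ [x]).length + xs.length := by
        simp; omega
      rw [hlen, ih (s ++ [x]) hs']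
      congr 1
      rw [List.append_assoc]
      simp

lemma goEq (l : List Int) : ∀ (nums : List Int), nums.Nodup →
    listUniqueGo l nums = decide ((nums ++ l.filter (fun x => x != 0)).Nodup) := by
  induction l with
  | nil => intro nums hn; simp [listUniqueGo, hn]
  | cons n t ih =>
    intro nums hn
    by_cases h0 : n = 0
    · subst h0
      rw [show listUniqueGo (0 :: t) nums = listUniqueGo t nums from by
        simp [listUniqueGo], ih nums hn]
      simp
    · simp only [listUniqueGo, if_pos h0]
      have hf : (n :: t).filter (fun x => x != 0) = n :: t.filter (fun x => x != 0) := by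
        simp [h0]
      rw [hf]
      by_cases hm : n ∈ nums
      · rw [if_pos hm]
        have h2 : ¬ (nums ++ n :: t.filter (fun x => x != 0)).Nodup := by
          intro h
          exact (List.disjoint_of_nodup_append h) hm (by simp)
        simp [h2]
      · rw [if_neg hm]
        have hn' : (nums ++ [n]).Nodup :=
          List.Nodup.append hn (List.nodup_singleton n) (List.disjoint_singleton.mpr hm)
        rw [ih (nums ++ [n]) hn']
        congr 1
        rw [List.append_assoc]
        simp

-- ===== VERDICT (by name: the statement is the Claim_ definition above) =====
lemma altEq (l : List Int) :
    list_unique_alt l = decide ((l.filter (fun x => x != 0)).Nodup) := by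
  have hsymm : ∀ (a b : Nat), (a == b) = (b == a) := by
    intro a b
    by_cases h : a = b
    · simp [h]
    · simp [h, Ne.symm h]
  simp only [list_unique_alt]
  rw [PySem.Set.ofList_eq_foldl, hsymm]
  have := lenFoldlAdd (l.filter (fun x => x != 0)) [] List.nodup_nil
  simpa using this

theorem list_unique_spec : Claim_equal_list_unique := by
  intro l _
  unfold Spec_list_unique list_unique
  rw [altEq, goEq l [] List.nodup_nil]
  simp
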